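-- pv_equiv track=rewrite | github.com/chaddech/roboreport | roboreport_helper_files/generate_questions.py | make_right_before_questions
-- ===== SOURCE A (Python) =====
-- from collections import defaultdict, Counter
--
-- def make_right_before_questions(pddl):
--     count = Counter()
--
--     for x in pddl:
--         count[x] += 1
--
--
--     right_before_qs = []
--     right_after_qs = []
--
--     for x in range(1, len(pddl)):
--         if count[pddl[x]] == 1:
--             right_before_qs.append((pddl[x], pddl[x-1]))
--
--     for x in range(len(pddl) - 1):
--         if count[pddl[x]] == 1:
--             right_after_qs.append((pddl[x], pddl[x+1]))
--
--     return right_before_qs, right_after_qs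
-- ===== SOURCE B (Python) =====
-- def make_right_before_questions(pddl):
--     # One pass records each value's first position and occurrence count; then we
--     # iterate over the DISTINCT values (dict insertion order = order of first
--     # occurrence = increasing position for unique values), so the sequence is
--     # never scanned a second time.
--     pos = {}
--     for i, x in enumerate(pddl):
--         if x in pos:
--             pos[x] = (pos[x][0], pos[x][1] + 1)
--         else:
--             pos[x] = (i, 1)
--     right_before_qs = []
--     right_after_qs = []
--     n = len(pddl)
--     for x, (i, c) in pos.items():
--         if c == 1:
--             if i > 0:
--                 right_before_qs.append((x, pddl[i - 1]))
--             if i < n - 1: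
--                 right_after_qs.append((x, pddl[i + 1]))
--     return right_before_qs, right_after_qs
-- ===== Notes on version B (the rewrite author's own statement) =====
-- stated objective: alternative
-- what changed: Instead of two index scans over the whole sequence filtered by Counter lookups, B records each value's first position and count in one dict pass and then iterates over the distinct values only (dict insertion order = increasing position for unique values), reading neighbours by the stored index.
import Mathlib
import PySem

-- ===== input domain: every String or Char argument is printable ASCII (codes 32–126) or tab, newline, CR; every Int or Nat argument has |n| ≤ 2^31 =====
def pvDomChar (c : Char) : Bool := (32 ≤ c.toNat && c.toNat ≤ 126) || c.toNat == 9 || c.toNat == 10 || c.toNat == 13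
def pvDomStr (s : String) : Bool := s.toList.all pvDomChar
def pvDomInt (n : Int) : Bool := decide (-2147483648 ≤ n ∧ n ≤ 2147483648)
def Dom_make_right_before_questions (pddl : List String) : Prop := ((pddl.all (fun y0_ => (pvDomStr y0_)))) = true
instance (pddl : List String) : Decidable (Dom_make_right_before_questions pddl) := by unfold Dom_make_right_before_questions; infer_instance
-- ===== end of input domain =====

-- B records each value's first position and occurrence count in one pass over the
-- sequence, then iterates over the distinct values only (dict insertion order),
-- instead of A's Counter plus two index scans of the sequence (objective: alternative).

-- ===== PORT A =====
def make_right_before_questions (pddl : List String) : (List (String × String)) × (List (String × String)) :=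
  let count : PySem.Dict String Int := pddl.foldl (fun d x => d.modify x 0 (· + 1)) PySem.Dict.empty
  let right_before_qs := (PySem.List.pyRange 1 (pddl.length : Int) 1).foldl
    (fun acc x => if count.getD (PySem.List.pyGetD pddl x "") 0 == 1
      then acc ++ [(PySem.List.pyGetD pddl x "", PySem.List.pyGetD pddl (x - 1) "")] else acc) []
  let right_after_qs := (PySem.List.pyRange 0 ((pddl.length : Int) - 1) 1).foldl
    (fun acc x => if count.getD (PySem.List.pyGetD pddl x "") 0 == 1
      then acc ++ [(PySem.List.pyGetD pddl x "", PySem.List.pyGetD pddl (x + 1) "")] else acc) []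
  (right_before_qs, right_after_qs)

-- ===== PORT B =====
def make_right_before_questions_alt (pddl : List String) : (List (String × String)) × (List (String × String)) :=
  let pos : PySem.Dict String (Int × Int) :=
    (PySem.List.enumerate pddl).foldl (fun d p =>
      match d.get? p.2 with
      | some v => d.insert p.2 (v.1, v.2 + 1)
      | none   => d.insert p.2 (p.1, 1)) PySem.Dict.empty
  let n : Int := (pddl.length : Int)
  pos.items.foldl (fun acc it =>
    if it.2.2 == 1 then
      ((if it.2.1 > 0 then acc.1 ++ [(it.1, PySem.List.pyGetD pddl (it.2.1 - 1) "")] else acc.1),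
       (if it.2.1 < n - 1 then acc.2 ++ [(it.1, PySem.List.pyGetD pddl (it.2.1 + 1) "")] else acc.2))
    else acc) ([], [])

-- ===== PRECONDITION & SPEC =====
def Spec_make_right_before_questions (pddl : List String) (out : (List (String × String)) × (List (String × String))) : Prop := out = make_right_before_questions_alt pddl
instance (pddl : List String) (out : (List (String × String)) × (List (String × String))) : Decidable (Spec_make_right_before_questions pddl out) := by unfold Spec_make_right_before_questions; infer_instance

-- ===== CLAIM (what is proved, stated in full; the proofs are below) =====
def Claim_equal_make_right_before_questions : Prop := ∀ (pddl : List String), Dom_make_right_before_questions pddl → Spec_make_right_before_questions pddl (make_right_before_questions pddl)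

-- ===== LEMMAS AND PROOFS =====

def buildPos (l : List String) : PySem.Dict String (Int × Int) :=
  (PySem.List.enumerate l).foldl (fun d p =>
    match d.get? p.2 with
    | some v => d.insert p.2 (v.1, v.2 + 1)
    | none   => d.insert p.2 (p.1, 1)) PySem.Dict.empty

def posSpec (l : List String) : List (String × (Int × Int)) :=
  ((List.range l.length).filter (fun i => !(l.take i).contains (l.getD i ""))).map
    (fun i => (l.getD i "", ((i : Int), (l.count (l.getD i "") : Int))))

lemma buildPos_step_eq (l : List String) :
    buildPos l = (PySem.List.enumerate l).foldl
      (fun d p => d.insert p.2 (match d.get? p.2 with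
        | some v => (v.1, v.2 + 1)
        | none   => (p.1, 1))) PySem.Dict.empty := by
  unfold buildPos
  congr 1
  funext d p
  cases h : d.get? p.2
  · simp
  · simp

lemma keys_buildPos (l : List String) : (buildPos l).keys = PySem.Set.ofList l := by
  rw [buildPos_step_eq]
  rw [PySem.Dict.keys_foldl_insert_key (key := fun p : Int × String => p.2)]
  simp [PySem.List.map_snd_enumerate, PySem.Set.ofList_eq_foldl, PySem.Set.update]

lemma nodup_keys_buildPos (l : List String) : (buildPos l).keys.Nodup := by
  rw [buildPos_step_eq]
  exact PySem.Dict.nodup_keys_foldl_insert_key _ _ _ _ PySem.Dict.nodup_keys_empty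

lemma contains_buildPos (l : List String) (a : String) :
    (buildPos l).contains a = decide (a ∈ l) := by
  by_cases h : a ∈ l
  · simp only [h, decide_true]
    rw [PySem.Dict.contains_iff_mem_keys, keys_buildPos]
    exact (PySem.Set.mem_ofList _ _).mpr h
  · simp only [h, decide_false]
    rw [← Bool.not_eq_true, PySem.Dict.contains_iff_mem_keys, keys_buildPos]
    intro hm
    exact h ((PySem.Set.mem_ofList _ _).mp hm)

lemma posSpec_front (l : List String) (a : String) :
    ((List.range l.length).filter (fun i => !((l++[a]).take i).contains ((l++[a]).getD i ""))).map
      (fun i => ((l++[a]).getD i "", ((i : Int), ((l++[a]).count ((l++[a]).getD i "") : Int))))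
    = ((List.range l.length).filter (fun i => !(l.take i).contains (l.getD i ""))).map
      (fun i => (l.getD i "", ((i : Int), ((l++[a]).count (l.getD i "") : Int)))) := by
  rw [List.filter_congr (fun i hi => by
    have hi' : i < l.length := List.mem_range.mp hi
    rw [List.getD_append l [a] "" i hi', List.take_append_of_le_length (le_of_lt hi')])]
  exact List.map_congr_left (fun i hi => by
    have hi' : i < l.length := List.mem_range.mp (List.mem_of_mem_filter hi)
    rw [List.getD_append l [a] "" i hi'])

lemma items_buildPos (l : List String) : (buildPos l).items = posSpec l := by
  induction l using List.reverseRecOn with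
  | nil => rfl
  | append_singleton l a ih =>
    have hstep : buildPos (l ++ [a]) =
        (match (buildPos l).get? a with
        | some v => (buildPos l).insert a (v.1, v.2 + 1)
        | none   => (buildPos l).insert a ((l.length : Int), 1)) := by
      unfold buildPos
      rw [PySem.List.enumerate_append, List.foldl_append]
      simp [PySem.List.enumerate_cons, PySem.List.enumerate_nil]
    have hg : (l ++ [a]).getD l.length "" = a := by
      rw [List.getD_eq_getElem _ _ (by simp)]; simp
    have ht : (l ++ [a]).take l.length = l := by
      rw [List.take_append_of_le_length le_rfl, List.take_length]
    have hsplit : posSpec (l ++ [a]) =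
        ((List.range l.length).filter (fun i => !(l.take i).contains (l.getD i ""))).map
          (fun i => (l.getD i "", ((i : Int), ((l++[a]).count (l.getD i "") : Int))))
        ++ (if a ∈ l then [] else [(a, ((l.length : Int), 1))]) := by
      unfold posSpec
      rw [(by simp : (l ++ [a]).length = l.length + 1), List.range_succ, List.filter_append,
        List.map_append, posSpec_front]
      congr 1
      by_cases hmem : a ∈ l
      · simp [ht, hmem]
      · have hc : (l ++ [a]).count a = 1 := by
          rw [List.count_append]; simp [List.count_eq_zero_of_not_mem hmem]
        simp [ht, hmem, List.count_eq_zero_of_not_mem hmem]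
    by_cases hmem : a ∈ l
    · have hcont : (buildPos l).contains a = true := by
        rw [contains_buildPos]; simp [hmem]
      obtain ⟨v, hv⟩ : ∃ v, (buildPos l).get? a = some v := by
        rw [PySem.Dict.contains_eq_isSome_get?] at hcont
        exact Option.isSome_iff_exists.mp hcont
      have hcont' : (buildPos l).contains a = true := by
        rw [contains_buildPos]; simp [hmem]
      rw [hstep, hv]
      rw [PySem.Dict.items_insert_of_contains _ _ hcont', ih, hsplit]
      simp only [hmem, if_true, List.append_nil]
      unfold posSpec
      rw [List.map_map]
      apply List.map_congr_left
      intro i hi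
      have hi' : i < l.length := List.mem_range.mp (List.mem_of_mem_filter hi)
      by_cases hia : l.getD i "" = a
      · have hmemitems : (a, ((i:Int), (l.count a : Int))) ∈ (buildPos l).items := by
          rw [ih]
          exact List.mem_map.mpr ⟨i, hi, by rw [hia]⟩
        have hget : (buildPos l).get? a = some ((i:Int), (l.count a : Int)) :=
          PySem.Dict.get?_of_mem_items _ hmemitems (nodup_keys_buildPos l)
        have hveq : v = ((i:Int), (l.count a : Int)) := by
          rw [hv] at hget; exact Option.some.inj hget
        have hca : (l ++ [a]).count a = l.count a + 1 := by
          rw [List.count_append]; simp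
        simp only [Function.comp_apply, hia, hveq, beq_self_eq_true, if_true, hca]
        push_cast
        rfl
      · have hne : (l.getD i "" == a) = false := beq_eq_false_iff_ne.mpr hia
        have hcount : (l ++ [a]).count (l.getD i "") = l.count (l.getD i "") := by
          have h0 : List.count (l.getD i "") [a] = 0 := by
            rw [List.count_eq_zero, List.mem_singleton]; simpa using hia
          rw [List.count_append, h0]
          omega
        simp only [Function.comp_apply, hne, if_false, Bool.false_eq_true, hcount]
    · have hcont : (buildPos l).contains a = false := by
        rw [contains_buildPos]; simp [hmem]
      have hget : (buildPos l).get? a = none := by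
        rw [PySem.Dict.get?_eq_none_iff_contains]; exact hcont
      rw [hstep, hget]
      rw [PySem.Dict.items_insert_of_not_contains _ _ hcont, ih, hsplit]
      simp only [hmem, if_false]
      congr 1
      unfold posSpec
      apply List.map_congr_left
      intro i hi
      have hi' : i < l.length := List.mem_range.mp (List.mem_of_mem_filter hi)
      have hia : l.getD i "" ≠ a := by
        intro h; exact hmem (h ▸ (List.getD_eq_getElem l "" hi' ▸ List.getElem_mem hi'))
      have hcount : (l ++ [a]).count (l.getD i "") = l.count (l.getD i "") := by
        have h0 : List.count (l.getD i "") [a] = 0 := by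
          rw [List.count_eq_zero, List.mem_singleton]; simpa using hia
        rw [List.count_append, h0]
        omega
      rw [hcount]

lemma filter_range_pos (n : Nat) :
    (List.range n).filter (fun i => decide (0 < i)) = (List.range (n - 1)).map (· + 1) := by
  cases n with
  | zero => rfl
  | succ m =>
    rw [List.range_succ_eq_map]
    simp [List.filter_map, Function.comp_def]

lemma filter_range_lt (n m : Nat) (h : m ≤ n) :
    (List.range n).filter (fun i => decide (i < m)) = List.range m := by
  induction n with
  | zero => simp [Nat.le_zero.mp h]
  | succ k ih =>
    rw [List.range_succ, List.filter_append]
    by_cases hm : m = k + 1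
    · subst hm
      have h1 : (List.range k).filter (fun i => decide (i < k+1)) = List.range k :=
        List.filter_eq_self.mpr (fun a ha => by simp at ha ⊢; omega)
      have h2 : [k].filter (fun i => decide (i < k+1)) = [k] := by simp
      rw [h1, h2, ← List.range_succ]
    · have hm' : m ≤ k := by omega
      rw [ih hm']
      simp
      omega

lemma uniq_first (l : List String) (i : Nat) (hi : i < l.length)
    (hc : l.count (l.getD i "") = 1) : ((l.take i).contains (l.getD i "")) = false := by
  set x := l.getD i "" with hx
  rw [← Bool.not_eq_true, List.contains_iff_mem]
  intro hmem
  have h1 : 0 < (l.take i).count x := List.count_pos_iff.mpr hmem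
  have h2 : 0 < (l.drop i).count x := by
    apply List.count_pos_iff.mpr
    have hd : l.drop i = l[i] :: l.drop (i+1) := List.drop_eq_getElem_cons hi
    rw [hd, hx, List.getD_eq_getElem l "" hi]
    exact List.mem_cons_self
  have h3 : l.count x = (l.take i).count x + (l.drop i).count x := by
    conv_lhs => rw [← List.take_append_drop i l]
    rw [List.count_append]
  omega

lemma filter_range_and_pos (P : Nat → Prop) [DecidablePred P] (n : Nat) :
    (List.range n).filter (fun i => decide (P i ∧ 0 < i))
      = ((List.range (n - 1)).filter (fun k => decide (P (k + 1)))).map (· + 1) := by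
  have h1 : (fun i => decide (P i ∧ 0 < i)) = fun i => decide (P i) && decide (0 < i) := by
    funext i; simp
  rw [h1, ← List.filter_filter, filter_range_pos, List.filter_map]
  congr 1

lemma filter_range_and_lt (P : Nat → Prop) [DecidablePred P] (n : Nat) :
    (List.range n).filter (fun i => decide (P i ∧ i < n - 1))
      = (List.range (n - 1)).filter (fun k => decide (P k)) := by
  have h1 : (fun i => decide (P i ∧ i < n - 1)) = fun i => decide (P i) && decide (i < n - 1) := by
    funext i; simp
  rw [h1, ← List.filter_filter, filter_range_lt n (n - 1) (Nat.sub_le _ _)]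

lemma A_before (l : List String) (q : String → Bool) :
    (PySem.List.pyRange 1 (l.length : Int) 1).foldl
      (fun acc x => if q (PySem.List.pyGetD l x "")
        then acc ++ [(PySem.List.pyGetD l x "", PySem.List.pyGetD l (x - 1) "")] else acc) []
    = ((List.range (l.length - 1)).filter (fun k => q (l.getD (k + 1) ""))).map
        (fun k => (l.getD (k + 1) "", l.getD k "")) := by
  have h1 : ∀ k : Nat, PySem.List.pyGetD l (1 + (k : Int)) "" = l.getD (k + 1) "" := by
    intro k
    have h : (1 + (k : Int)) = ((k + 1 : Nat) : Int) := by push_cast; ring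
    rw [h, PySem.List.pyGetD_natCast]
  have h2 : ∀ k : Nat, PySem.List.pyGetD l (1 + (k : Int) - 1) "" = l.getD k "" := by
    intro k
    have h : (1 + (k : Int) - 1) = ((k : Nat) : Int) := by ring
    rw [h, PySem.List.pyGetD_natCast]
  have ht : (((l.length : Int)) - 1).toNat = l.length - 1 := by omega
  rw [PySem.List.foldl_append_if, PySem.List.pyRange_one, ht, List.filter_map, List.map_map]
  have e1 : ((fun x => q (PySem.List.pyGetD l x "")) ∘ fun k : ℕ => 1 + (k : Int))
      = (fun k : ℕ => q (l.getD (k + 1) "")) := by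
    funext k; simp only [Function.comp_apply, h1]
  have e2 : ((fun x => ((PySem.List.pyGetD l x "", PySem.List.pyGetD l (x - 1) "") : String × String))
        ∘ fun k : ℕ => 1 + (k : Int))
      = (fun k : ℕ => (l.getD (k + 1) "", l.getD k "")) := by
    funext k; simp only [Function.comp_apply, h1, h2]
  rw [e1, e2, List.nil_append]

lemma A_after (l : List String) (q : String → Bool) :
    (PySem.List.pyRange 0 ((l.length : Int) - 1) 1).foldl
      (fun acc x => if q (PySem.List.pyGetD l x "")
        then acc ++ [(PySem.List.pyGetD l x "", PySem.List.pyGetD l (x + 1) "")] else acc) []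
    = ((List.range (l.length - 1)).filter (fun k => q (l.getD k ""))).map
        (fun k => (l.getD k "", l.getD (k + 1) "")) := by
  have h1 : ∀ k : Nat, PySem.List.pyGetD l (0 + (k : Int)) "" = l.getD k "" := by
    intro k
    have h : (0 + (k : Int)) = ((k : Nat) : Int) := by ring
    rw [h, PySem.List.pyGetD_natCast]
  have h2 : ∀ k : Nat, PySem.List.pyGetD l (0 + (k : Int) + 1) "" = l.getD (k + 1) "" := by
    intro k
    have h : (0 + (k : Int) + 1) = ((k + 1 : Nat) : Int) := by push_cast; ring
    rw [h, PySem.List.pyGetD_natCast]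
  have ht : (((l.length : Int)) - 1 - 0).toNat = l.length - 1 := by omega
  rw [PySem.List.foldl_append_if, PySem.List.pyRange_one, ht, List.filter_map, List.map_map]
  have e1 : ((fun x => q (PySem.List.pyGetD l x "")) ∘ fun k : ℕ => 0 + (k : Int))
      = (fun k : ℕ => q (l.getD k "")) := by
    funext k; simp only [Function.comp_apply, h1]
  have e2 : ((fun x => ((PySem.List.pyGetD l x "", PySem.List.pyGetD l (x + 1) "") : String × String))
        ∘ fun k : ℕ => 0 + (k : Int))
      = (fun k : ℕ => (l.getD k "", l.getD (k + 1) "")) := by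
    funext k; simp only [Function.comp_apply, h1, h2]
  rw [e1, e2, List.nil_append]

lemma beq_cast_one (c : Nat) : (((c : Int)) == 1) = decide (c = 1) := by
  simp [Bool.beq_eq_decide_eq, Nat.cast_eq_one]

lemma B_out (l : List String) :
    make_right_before_questions_alt l
      = (((posSpec l).filter (fun it => decide (it.2.2 = 1 ∧ 0 < it.2.1))).map
           (fun it => (it.1, PySem.List.pyGetD l (it.2.1 - 1) "")),
         ((posSpec l).filter (fun it => decide (it.2.2 = 1 ∧ it.2.1 < (l.length : Int) - 1))).map
           (fun it => (it.1, PySem.List.pyGetD l (it.2.1 + 1) ""))) := by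
  have hstart : make_right_before_questions_alt l = (buildPos l).items.foldl
      (fun acc it =>
        if it.2.2 == 1 then
          ((if it.2.1 > 0 then acc.1 ++ [(it.1, PySem.List.pyGetD l (it.2.1 - 1) "")] else acc.1),
           (if it.2.1 < (l.length : Int) - 1 then acc.2 ++ [(it.1, PySem.List.pyGetD l (it.2.1 + 1) "")] else acc.2))
        else acc) ([], []) := rfl
  rw [hstart]
  have hcongr := PySem.List.foldl_congr_mem
    (l := (buildPos l).items)
    (init := (([], []) : List (String × String) × List (String × String)))
    (f := fun acc it =>
      if it.2.2 == 1 then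
        ((if it.2.1 > 0 then acc.1 ++ [(it.1, PySem.List.pyGetD l (it.2.1 - 1) "")] else acc.1),
         (if it.2.1 < (l.length : Int) - 1 then acc.2 ++ [(it.1, PySem.List.pyGetD l (it.2.1 + 1) "")] else acc.2))
      else acc)
    (g := fun (acc : List (String × String) × List (String × String)) it =>
      ((if it.2.2 = 1 ∧ 0 < it.2.1 then acc.1 ++ [(it.1, PySem.List.pyGetD l (it.2.1 - 1) "")] else acc.1),
       (if it.2.2 = 1 ∧ it.2.1 < (l.length : Int) - 1 then acc.2 ++ [(it.1, PySem.List.pyGetD l (it.2.1 + 1) "")] else acc.2)))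
    (by
      intro acc it _
      by_cases h1 : it.2.2 = 1
      · simp [h1]
      · simp [h1])
  rw [hcongr]
  have hprod := PySem.List.foldl_prod_mk
    (f := fun acc it => if it.2.2 = 1 ∧ 0 < it.2.1 then acc ++ [(it.1, PySem.List.pyGetD l (it.2.1 - 1) "")] else acc)
    (g := fun acc it => if it.2.2 = 1 ∧ it.2.1 < (l.length : Int) - 1 then acc ++ [(it.1, PySem.List.pyGetD l (it.2.1 + 1) "")] else acc)
    ((buildPos l).items) [] []
  beta_reduce at hprod
  rw [hprod]
  rw [PySem.List.foldl_append_ite, PySem.List.foldl_append_ite, items_buildPos]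
  simp only [List.nil_append]

lemma B1_eq (l : List String) :
    ((posSpec l).filter (fun it => decide (it.2.2 = 1 ∧ 0 < it.2.1))).map
      (fun it => (it.1, PySem.List.pyGetD l (it.2.1 - 1) ""))
    = ((List.range (l.length - 1)).filter (fun k => decide (l.count (l.getD (k + 1) "") = 1))).map
        (fun k => (l.getD (k + 1) "", l.getD k "")) := by
  unfold posSpec
  rw [List.filter_map, List.map_map, List.filter_filter]
  rw [List.filter_congr (q := fun i => decide (l.count (l.getD i "") = 1 ∧ 0 < i))
    (by
      intro i hi
      have hi' : i < l.length := List.mem_range.mp hi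
      simp only [Function.comp_apply]
      by_cases hc : l.count (l.getD i "") = 1
      · by_cases hp : 0 < i
        · rw [uniq_first l i hi' hc]
          simp [hp]
        · simp [hp]
      · have hcq : List.count (l[i]?.getD "") l ≠ 1 := hc
        have hcq' : ¬ ((List.count (l[i]?.getD "") l : Int) = 1) := by exact_mod_cast hc
        simp [hcq, hcq'])]
  rw [filter_range_and_pos (fun i => l.count (l.getD i "") = 1) l.length, List.map_map]
  apply List.map_congr_left
  intro k _
  simp only [Function.comp_apply]
  have h : ((k : Int) + 1) - 1 = ((k : Nat) : Int) := by ring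
  have h2 : ((k + 1 : Nat) : Int) = (k : Int) + 1 := by push_cast; ring
  rw [h2, h, PySem.List.pyGetD_natCast]

lemma B2_eq (l : List String) :
    ((posSpec l).filter (fun it => decide (it.2.2 = 1 ∧ it.2.1 < (l.length : Int) - 1))).map
      (fun it => (it.1, PySem.List.pyGetD l (it.2.1 + 1) ""))
    = ((List.range (l.length - 1)).filter (fun k => decide (l.count (l.getD k "") = 1))).map
        (fun k => (l.getD k "", l.getD (k + 1) "")) := by
  unfold posSpec
  rw [List.filter_map, List.map_map, List.filter_filter]
  rw [List.filter_congr (q := fun i => decide (l.count (l.getD i "") = 1 ∧ i < l.length - 1))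
    (by
      intro i hi
      have hi' : i < l.length := List.mem_range.mp hi
      have hiff : ((i : Int) < (l.length : Int) - 1) ↔ i < l.length - 1 := by omega
      simp only [Function.comp_apply]
      by_cases hc : l.count (l.getD i "") = 1
      · by_cases hp : i < l.length - 1
        · rw [uniq_first l i hi' hc]
          simp [hiff, hp]
        · simp [hiff, hp]
      · have hcq : List.count (l[i]?.getD "") l ≠ 1 := hc
        have hcq' : ¬ ((List.count (l[i]?.getD "") l : Int) = 1) := by exact_mod_cast hc
        simp [hcq, hcq'])]
  rw [filter_range_and_lt (fun i => l.count (l.getD i "") = 1) l.length]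
  apply List.map_congr_left
  intro k _
  simp only [Function.comp_apply]
  have h : ((k : Nat) : Int) + 1 = ((k + 1 : Nat) : Int) := by push_cast; ring
  rw [h, PySem.List.pyGetD_natCast]

-- ===== VERDICT (by name: the statement is the Claim_ definition above) =====
theorem make_right_before_questions_spec : Claim_equal_make_right_before_questions := by
  intro l _
  unfold Spec_make_right_before_questions
  rw [B_out, B1_eq, B2_eq]
  simp only [make_right_before_questions]
  rw [← PySem.Dict.counter_eq_foldl]
  rw [A_before l (fun v => ((PySem.Dict.counter l).getD v 0 == 1)),
      A_after l (fun v => ((PySem.Dict.counter l).getD v 0 == 1))]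
  simp only [PySem.Dict.getD_counter, beq_cast_one]
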